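-- pv_equiv track=rewrite | github.com/AICardiologist/FoundationRelativity | paper 66/p66_compute.py | enumerate_bqf_classes
-- ===== SOURCE A (Python) =====
-- import math
--
-- def enumerate_bqf_classes(D):
--     """
--     Enumerate all reduced positive-definite binary quadratic forms
--     of discriminant D < 0.
--     Returns list of (a, b, c) with b^2 - 4ac = D.
--     """
--     if D >= 0:
--         return []
--
--     absD = abs(D)
--     forms = []
--     a_max = math.isqrt(absD // 3) + 1
--
--     for a in range(1, a_max + 1):
--         # b^2 - 4ac = D => b^2 = D + 4ac => b^2 ≡ D (mod 4a)
--         # Also |b| <= a for reduced form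
--         for b in range(-a, a + 1):
--             num = b * b - D  # = 4ac, must be divisible by 4a
--             if num <= 0:
--                 continue
--             if num % (4 * a) != 0:
--                 continue
--             c = num // (4 * a)
--             if c < a:
--                 continue
--             # Boundary conditions
--             if a == c and b < 0:
--                 continue
--             if abs(b) == a and b < 0:
--                 continue
--             forms.append((a, b, c))
--
--     return forms
-- ===== SOURCE B (Python) =====
-- import math
--
-- def enumerate_bqf_classes(D):
--     """
--     Enumerate all reduced positive-definite binary quadratic forms
--     of discriminant D < 0, by scanning c for each a and recognising
--     perfect squares 4ac + D, instead of scanning b and testing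
--     divisibility.  Returns list of (a, b, c) with b^2 - 4ac = D.
--     """
--     if D >= 0:
--         return []
--
--     forms = []
--     a_max = math.isqrt(-D // 3) + 1
--
--     for a in range(1, a_max + 1):
--         row = []
--         c_max = (a * a - D) // (4 * a)
--         for c in range(a, c_max + 1):
--             t = 4 * a * c + D  # = b^2 if (a, b, c) is a form
--             if t < 0:
--                 continue
--             s = math.isqrt(t)
--             if s * s != t or s > a:
--                 continue
--             if s > 0 and a != c and s != a:
--                 row.append((a, -s, c))
--             row.append((a, s, c))
--         row.sort(key=lambda f: f[1])
--         forms.extend(row)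
--     return forms
-- ===== Notes on version B (the rewrite author's own statement) =====
-- stated objective: alternative
-- what changed: Instead of scanning b in [-a,a] and testing divisibility of b^2-D by 4a, B scans c in [a,(a^2-D)//(4a)] and tests whether 4ac+D is a perfect square via isqrt, emitting b=±s and sorting each per-a row by b to reproduce A's order.
import Mathlib
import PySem

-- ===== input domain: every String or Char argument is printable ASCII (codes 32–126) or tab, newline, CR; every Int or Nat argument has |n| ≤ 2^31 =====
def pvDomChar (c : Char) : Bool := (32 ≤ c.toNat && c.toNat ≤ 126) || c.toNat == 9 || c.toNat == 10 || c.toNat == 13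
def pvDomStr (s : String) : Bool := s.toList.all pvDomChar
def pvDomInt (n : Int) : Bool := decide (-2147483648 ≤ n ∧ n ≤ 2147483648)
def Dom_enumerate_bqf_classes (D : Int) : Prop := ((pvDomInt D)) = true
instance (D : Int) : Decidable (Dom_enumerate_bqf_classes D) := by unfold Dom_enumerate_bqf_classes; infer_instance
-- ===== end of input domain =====

-- B replaces A's per-a scan over b with divisibility tests by a per-a scan over c
-- recognising perfect squares 4ac+D (then sorts each per-a row by b); alternative
-- decomposition, same results, not claimed faster.

-- ===== PORT A =====
-- math.isqrt(n) (n ≥ 0) ported as Nat.sqrt on n.toNat — exact floor square root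
def pyIsqrt (n : Int) : Int := Int.ofNat (Nat.sqrt n.toNat)

def enumerate_bqf_classes (D : Int) : List (Int × Int × Int) :=
  if D ≥ 0 then []
  else
    let absD := |D|
    let a_max := pyIsqrt (PySem.Int.floordiv absD 3) + 1
    (PySem.List.pyRange 1 (a_max + 1) 1).foldl (fun forms a =>
      (PySem.List.pyRange (-a) (a + 1) 1).foldl (fun forms b =>
        let num := b * b - D
        if num ≤ 0 then forms
        else if PySem.Int.mod num (4 * a) ≠ 0 then forms
        else
          let c := PySem.Int.floordiv num (4 * a)
          if c < a then forms
          else if a = c ∧ b < 0 then forms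
          else if |b| = a ∧ b < 0 then forms
          else forms ++ [(a, b, c)]) forms) []

-- ===== PORT B =====
def enumerate_bqf_classes_alt (D : Int) : List (Int × Int × Int) :=
  if D ≥ 0 then []
  else
    let a_max := pyIsqrt (PySem.Int.floordiv (-D) 3) + 1
    (PySem.List.pyRange 1 (a_max + 1) 1).foldl (fun forms a =>
      let c_max := PySem.Int.floordiv (a * a - D) (4 * a)
      let row := (PySem.List.pyRange a (c_max + 1) 1).foldl (fun row c =>
        let t := 4 * a * c + D
        if t < 0 then row
        else
          let s := pyIsqrt t
          if s * s ≠ t ∨ s > a then row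
          else
            (if 0 < s ∧ a ≠ c ∧ s ≠ a then row ++ [(a, -s, c)] else row) ++ [(a, s, c)]) []
      forms ++ PySem.List.sorted row (fun f => f.2.1) false) []

-- ===== PRECONDITION & SPEC =====
def Spec_enumerate_bqf_classes (D : Int) (out : List (Int × Int × Int)) : Prop := out = enumerate_bqf_classes_alt D
instance (D : Int) (out : List (Int × Int × Int)) : Decidable (Spec_enumerate_bqf_classes D out) := by unfold Spec_enumerate_bqf_classes; infer_instance

-- ===== CLAIM (what is proved, stated in full; the proofs are below) =====
def Claim_equal_enumerate_bqf_classes : Prop := ∀ (D : Int), Dom_enumerate_bqf_classes D → Spec_enumerate_bqf_classes D (enumerate_bqf_classes D)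

-- ===== LEMMAS AND PROOFS =====

-- A's per-a row: the b-scan as filter-then-map
def rowA (D a : Int) : List (Int × Int × Int) :=
  ((PySem.List.pyRange (-a) (a + 1) 1).filter (fun b =>
    decide (¬ (b * b - D ≤ 0) ∧ PySem.Int.mod (b * b - D) (4 * a) = 0 ∧
      ¬ (PySem.Int.floordiv (b * b - D) (4 * a) < a) ∧
      ¬ (a = PySem.Int.floordiv (b * b - D) (4 * a) ∧ b < 0) ∧
      ¬ (|b| = a ∧ b < 0)))).map
    (fun b => (a, b, PySem.Int.floordiv (b * b - D) (4 * a)))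

-- B's per-c contribution
def gB (D a c : Int) : List (Int × Int × Int) :=
  let t := 4 * a * c + D
  if t < 0 then []
  else
    let s := pyIsqrt t
    if s * s ≠ t ∨ s > a then []
    else (if 0 < s ∧ a ≠ c ∧ s ≠ a then [(a, -s, c)] else []) ++ [(a, s, c)]

-- B's per-a row (pre-sort): the c-scan as flatMap
def rowB (D a : Int) : List (Int × Int × Int) :=
  (PySem.List.pyRange a (PySem.Int.floordiv (a * a - D) (4 * a) + 1) 1).flatMap (gB D a)

-- the common characterisation of both per-a rows
def GoodP (D a : Int) (x : Int × Int × Int) : Prop :=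
  ∃ b c : Int, x = (a, b, c) ∧ b * b = 4 * a * c + D ∧ -a < b ∧ b ≤ a ∧ a ≤ c ∧ (a = c → 0 ≤ b)

lemma pyIsqrt_nonneg (n : Int) : 0 ≤ pyIsqrt n := by
  simp [pyIsqrt]

lemma pyIsqrt_sq (b : Int) : pyIsqrt (b * b) = |b| := by
  have h1 : (b * b).toNat = b.natAbs * b.natAbs := by
    rw [← Int.natAbs_mul_self]
    exact Int.toNat_natCast _
  have h2 : (b.natAbs * b.natAbs).sqrt = b.natAbs := by
    have := Nat.sqrt_eq' b.natAbs
    simpa [Nat.pow_two] using this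
  rw [pyIsqrt, h1, h2]
  exact (Int.abs_eq_natAbs b).symm

lemma innerA_eq (D a forms) :
    (PySem.List.pyRange (-a) (a + 1) 1).foldl (fun forms b =>
        let num := b * b - D
        if num ≤ 0 then forms
        else if PySem.Int.mod num (4 * a) ≠ 0 then forms
        else
          let c := PySem.Int.floordiv num (4 * a)
          if c < a then forms
          else if a = c ∧ b < 0 then forms
          else if |b| = a ∧ b < 0 then forms
          else forms ++ [(a, b, c)]) forms = forms ++ rowA D a := by
  refine (PySem.List.foldl_congr_mem' _ _ (fun acc b =>
      if (decide (¬ (b * b - D ≤ 0) ∧ PySem.Int.mod (b * b - D) (4 * a) = 0 ∧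
        ¬ (PySem.Int.floordiv (b * b - D) (4 * a) < a) ∧
        ¬ (a = PySem.Int.floordiv (b * b - D) (4 * a) ∧ b < 0) ∧
        ¬ (|b| = a ∧ b < 0))) = true then acc ++ [(a, b, PySem.Int.floordiv (b * b - D) (4 * a))]
      else acc) _ ?_).trans ?_
  · intro b _ acc
    simp only [decide_eq_true_eq]
    split_ifs <;> tauto
  · unfold rowA
    exact PySem.List.foldl_append_if _ _ _ _

lemma innerB_eq (D a : Int) :
    (PySem.List.pyRange a (PySem.Int.floordiv (a * a - D) (4 * a) + 1) 1).foldl (fun row c =>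
        let t := 4 * a * c + D
        if t < 0 then row
        else
          let s := pyIsqrt t
          if s * s ≠ t ∨ s > a then row
          else
            (if 0 < s ∧ a ≠ c ∧ s ≠ a then row ++ [(a, -s, c)] else row) ++ [(a, s, c)]) [] =
      rowB D a := by
  refine (PySem.List.foldl_congr_mem' _ _ (fun acc c => acc ++ gB D a c) _ ?_).trans ?_
  · intro c _ acc
    simp only [gB]
    split_ifs <;> simp
  · unfold rowB
    rw [PySem.List.foldl_append_eq_flatMap, List.nil_append]

lemma rowA_pairwise (D a : Int) :
    (rowA D a).Pairwise (fun x y => x.2.1 < y.2.1) := by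
  simp only [rowA, List.pairwise_map]
  exact (PySem.List.pairwise_lt_pyRange_one (-a) (a + 1)).filter _

lemma mem_rowA (D a : Int) (hD : D < 0) (ha : 1 ≤ a) (x : Int × Int × Int) :
    x ∈ rowA D a ↔ GoodP D a x := by
  have h4a : (0 : Int) < 4 * a := by omega
  simp only [rowA, List.mem_map, List.mem_filter, PySem.List.mem_pyRange_one,
    decide_eq_true_eq, GoodP]
  constructor
  · rintro ⟨b, ⟨⟨hlb, hub⟩, hpos, hmod, hge, hbc, hba⟩, rfl⟩
    have hdvd : (4 * a) ∣ (b * b - D) := (PySem.Int.mod_eq_zero_iff_dvd _ _).1 hmod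
    have hfd : PySem.Int.floordiv (b * b - D) (4 * a) * (4 * a) = b * b - D := by
      rw [PySem.Int.floordiv_eq_ediv_of_pos h4a]
      exact Int.ediv_mul_cancel hdvd
    refine ⟨b, _, rfl, by linarith, ?_, by omega, by omega, fun hac => ?_⟩
    · rcases lt_or_eq_of_le hlb with h | h
      · exact h
      · exfalso
        apply hba
        refine ⟨?_, by omega⟩
        rw [← h, abs_of_nonpos (by omega : -a ≤ (0:Int))]
        ring
    · by_contra hb; exact hbc ⟨hac, by omega⟩
  · rintro ⟨b, c, rfl, hsq, hlb, hub, hac, himp⟩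
    have hcfd : PySem.Int.floordiv (b * b - D) (4 * a) = c := by
      rw [PySem.Int.floordiv_eq_iff_of_pos h4a]
      constructor <;> nlinarith
    refine ⟨b, ⟨⟨by omega, by omega⟩,
      by simp only [not_le]; nlinarith [mul_pos (by omega : (0:Int) < a) (by omega : (0:Int) < c)],
      ?_, by omega, ?_, ?_⟩, by rw [hcfd]⟩
    · rw [PySem.Int.mod_eq_zero_iff_dvd]
      exact ⟨c, by linarith⟩
    · rw [hcfd]; rintro ⟨hac', hb⟩; exact absurd (himp hac') (by omega)
    · rintro ⟨habs, hb⟩; rw [abs_of_neg hb] at habs; omega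

lemma mem_gB (D a c : Int) (x : Int × Int × Int) :
    x ∈ gB D a c ↔
      (0 ≤ 4 * a * c + D ∧ pyIsqrt (4 * a * c + D) * pyIsqrt (4 * a * c + D) = 4 * a * c + D ∧
        pyIsqrt (4 * a * c + D) ≤ a ∧
        (x = (a, pyIsqrt (4 * a * c + D), c) ∨
          ((0 < pyIsqrt (4 * a * c + D) ∧ a ≠ c ∧ pyIsqrt (4 * a * c + D) ≠ a) ∧
            x = (a, -pyIsqrt (4 * a * c + D), c)))) := by
  simp only [gB]
  split_ifs with h1 h2 h3
  · simp only [List.not_mem_nil, false_iff]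
    rintro ⟨h, _⟩; omega
  · simp only [List.not_mem_nil, false_iff]
    rintro ⟨_, hsq, hsa, _⟩
    rcases h2 with h | h
    · exact h hsq
    · omega
  · push_neg at h1 h2
    simp only [List.cons_append, List.nil_append, List.mem_cons, List.mem_singleton,
      List.not_mem_nil, or_false]
    constructor
    · rintro (hx | hx)
      · exact ⟨h1, h2.1, h2.2, Or.inr ⟨h3, hx⟩⟩
      · exact ⟨h1, h2.1, h2.2, Or.inl hx⟩
    · rintro ⟨_, _, _, hx | ⟨_, hx⟩⟩
      · exact Or.inr hx
      · exact Or.inl hx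
  · push_neg at h1 h2
    simp only [List.nil_append, List.mem_singleton]
    constructor
    · intro hx
      exact ⟨h1, h2.1, h2.2, Or.inl hx⟩
    · rintro ⟨_, _, _, hx | ⟨hq, hx⟩⟩
      · exact hx
      · exact absurd hq h3

lemma mem_gB_snd (D a c : Int) (x : Int × Int × Int) (hx : x ∈ gB D a c) : x.2.2 = c := by
  rw [mem_gB] at hx
  rcases hx.2.2.2 with h | ⟨_, h⟩ <;> simp [h]

lemma mem_rowB (D a : Int) (hD : D < 0) (ha : 1 ≤ a) (x : Int × Int × Int) :
    x ∈ rowB D a ↔ GoodP D a x := by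
  have h4a : (0 : Int) < 4 * a := by omega
  simp only [rowB, List.mem_flatMap, PySem.List.mem_pyRange_one, GoodP]
  constructor
  · rintro ⟨c, ⟨hca, _⟩, hx⟩
    rw [mem_gB] at hx
    obtain ⟨ht, hsq, hsa, hx⟩ := hx
    have hs0 : 0 ≤ pyIsqrt (4 * a * c + D) := pyIsqrt_nonneg _
    rcases hx with rfl | ⟨⟨hspos, hanec, hsnea⟩, rfl⟩
    · exact ⟨_, c, rfl, hsq, by omega, hsa, hca, fun _ => hs0⟩
    · exact ⟨_, c, rfl, by rw [neg_mul_neg]; exact hsq, by omega, by omega, hca,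
        fun hac => absurd hac hanec⟩
  · rintro ⟨b, c, rfl, hsq, hlb, hub, hac, himp⟩
    have hb2 : 0 ≤ b * b := mul_self_nonneg b
    have hiq : pyIsqrt (4 * a * c + D) = |b| := by rw [← hsq, pyIsqrt_sq]
    refine ⟨c, ⟨hac, ?_⟩, ?_⟩
    · have : c ≤ PySem.Int.floordiv (a * a - D) (4 * a) := by
        rw [PySem.Int.le_floordiv_iff_mul_le h4a]
        nlinarith
      omega
    · rw [mem_gB, hiq]
      refine ⟨by linarith, by rw [abs_mul_abs_self]; exact hsq, abs_le.2 ⟨by omega, hub⟩, ?_⟩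
      by_cases hb : 0 ≤ b
      · exact Or.inl (by rw [abs_of_nonneg hb])
      · have hb' : b < 0 := by omega
        refine Or.inr ⟨⟨by rw [abs_of_neg hb']; omega, fun hac' => absurd (himp hac') (by omega),
          fun hba => by rw [abs_of_neg hb'] at hba; omega⟩, ?_⟩
        rw [abs_of_neg hb']
        simp

lemma rowB_nodup (D a : Int) : (rowB D a).Nodup := by
  rw [rowB, List.nodup_flatMap]
  constructor
  · intro c _
    simp only [gB]
    split_ifs with h1 h2 h3 <;> simp_all
    omega
  · refine (PySem.List.pairwise_lt_pyRange_one _ _).imp ?_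
    intro c d hcd
    intro x hx hy
    have := mem_gB_snd D a c x hx
    have := mem_gB_snd D a d x hy
    omega

lemma rowB_perm_rowA (D a : Int) (hD : D < 0) (ha : 1 ≤ a) :
    (rowA D a).Perm (rowB D a) := by
  have ndA : (rowA D a).Nodup :=
    (rowA_pairwise D a).imp (fun h => by rintro rfl; exact lt_irrefl _ h)
  refine (List.perm_ext_iff_of_nodup ndA (rowB_nodup D a)).2 ?_
  intro x
  rw [mem_rowA D a hD ha, mem_rowB D a hD ha]

lemma sorted_rowB (D a : Int) (hD : D < 0) (ha : 1 ≤ a) :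
    PySem.List.sorted (rowB D a) (fun f => f.2.1) false = rowA D a :=
  PySem.List.sorted_eq_of_perm_of_pairwise_lt _ _ (fun f => f.2.1)
    (rowB_perm_rowA D a hD ha) (rowA_pairwise D a)

-- ===== VERDICT (by name: the statement is the Claim_ definition above) =====
theorem enumerate_bqf_classes_spec : Claim_equal_enumerate_bqf_classes := by
  intro D _
  unfold Spec_enumerate_bqf_classes
  by_cases hD : D ≥ 0
  · simp [enumerate_bqf_classes, enumerate_bqf_classes_alt, hD]
  · have hD' : D < 0 := by omega
    have hA : enumerate_bqf_classes D =
        (PySem.List.pyRange 1 (pyIsqrt (PySem.Int.floordiv (-D) 3) + 1 + 1) 1).foldl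
          (fun forms a => forms ++ rowA D a) [] := by
      simp only [enumerate_bqf_classes, if_neg hD, abs_of_neg hD']
      exact PySem.List.foldl_congr_mem _ _ _ _ (fun acc a _ => innerA_eq D a acc)
    have hB : enumerate_bqf_classes_alt D =
        (PySem.List.pyRange 1 (pyIsqrt (PySem.Int.floordiv (-D) 3) + 1 + 1) 1).foldl
          (fun forms a => forms ++ rowA D a) [] := by
      simp only [enumerate_bqf_classes_alt, if_neg hD]
      refine PySem.List.foldl_congr_mem _ _ _ _ ?_
      intro acc a ha
      have ha1 : 1 ≤ a := (PySem.List.mem_pyRange_one.1 ha).1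
      rw [innerB_eq D a, sorted_rowB D a hD' ha1]
    rw [hA, hB]
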